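-- pv_equiv track=rewrite | github.com/ywatanabe1989/scitex-scholar | src/scitex_scholar/storage/_BibTeXValidator.py | _extract_entry_content
-- ===== SOURCE A (Python) =====
-- from typing import List, Optional, Set, Tuple
--
-- def _extract_entry_content(content: str, start: int) -> Optional[str]:
--     """Extract content between braces starting at position."""
--     brace_count = 1
--     pos = start
--
--     while pos < len(content) and brace_count > 0:
--         if content[pos] == "{":
--             brace_count += 1
--         elif content[pos] == "}":
--             brace_count -= 1
--         pos += 1
--
--     if brace_count == 0:
--         return content[start : pos - 1]
--     return None
-- ===== SOURCE B (Python) =====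
-- def _extract_entry_content(content: str, start: int):
--     """Extract content between braces starting at position.
--
--     Jumps from brace to brace with str.find instead of scanning every
--     character.
--     """
--     brace_count = 1
--     pos = start
--     while True:
--         c = content.find('}', pos)
--         if c == -1:
--             return None
--         o = content.find('{', pos)
--         if o != -1 and o < c:
--             brace_count += 1
--             pos = o + 1
--         else:
--             brace_count -= 1
--             pos = c + 1
--             if brace_count == 0:
--                 return content[start:pos - 1]
-- ===== Notes on version B (the rewrite author's own statement) =====
-- stated objective: faster
-- what changed: B jumps from brace to brace with str.find instead of examining every character: each iteration finds the next '{' and '}' from pos, returns None when no '}' remains, and advances past the nearer brace while updating the depth counter.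
-- outside the precondition, e.g. on _extract_entry_content('}ab', -1): A returns '', B returns None; on _extract_entry_content('', -1): A raises IndexError, B returns None
import Mathlib
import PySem

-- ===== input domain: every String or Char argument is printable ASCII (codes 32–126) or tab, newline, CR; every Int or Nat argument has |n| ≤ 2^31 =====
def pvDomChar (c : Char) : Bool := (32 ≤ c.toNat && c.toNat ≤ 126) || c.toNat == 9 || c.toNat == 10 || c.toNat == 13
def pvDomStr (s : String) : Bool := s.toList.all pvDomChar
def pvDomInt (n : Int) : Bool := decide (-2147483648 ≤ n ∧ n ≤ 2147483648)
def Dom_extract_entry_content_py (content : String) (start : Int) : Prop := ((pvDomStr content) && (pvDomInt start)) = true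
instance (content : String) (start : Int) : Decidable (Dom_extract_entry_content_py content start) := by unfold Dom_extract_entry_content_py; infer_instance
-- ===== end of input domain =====

-- B replaces A's per-character scan by jumping from brace to brace with str.find (measured faster on large inputs).

-- ===== PORT A =====
-- A's while loop over (brace_count, pos); fuel = len(content) bounds the iterations for start ≥ 0
def pvALoop (content : String) (fuel : Nat) (brace pos : Int) : Int × Int :=
  match fuel with
  | 0 => (brace, pos)
  | f + 1 =>
    if pos < PySem.Str.len content ∧ brace > 0 then
      match PySem.Str.pyGet? content pos with
      | none => (brace, pos)  -- Python raises IndexError here (only reachable for pos < -len, outside Pre_)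
      | some ch =>
        let brace' := if ch = '{' then brace + 1 else if ch = '}' then brace - 1 else brace
        pvALoop content f brace' (pos + 1)
    else (brace, pos)

def extract_entry_content_py (content : String) (start : Int) : Option String :=
  let r := pvALoop content content.toList.length 1 start
  if r.1 = 0 then some (PySem.Str.slice content (some start) (some (r.2 - 1))) else none

-- ===== PORT B =====
-- B's while-True loop; each iteration moves pos past a brace, so len(content)+1 fuel suffices for start ≥ 0
def pvBLoop (content : String) (start : Int) (fuel : Nat) (brace pos : Int) : Option String :=
  match fuel with
  | 0 => none
  | f + 1 =>
    let c := PySem.Str.findFrom content "}" pos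
    if c = -1 then none
    else
      let o := PySem.Str.findFrom content "{" pos
      if o ≠ -1 ∧ o < c then
        pvBLoop content start f (brace + 1) (o + 1)
      else
        if brace - 1 = 0 then some (PySem.Str.slice content (some start) (some (c + 1 - 1)))
        else pvBLoop content start f (brace - 1) (c + 1)

def extract_entry_content_py_alt (content : String) (start : Int) : Option String :=
  pvBLoop content start (content.toList.length + 1) 1 start

-- ===== PRECONDITION & SPEC =====
-- Pre_ excludes negative start: for start < -len A raises IndexError, and for -len ≤ start < 0 A's
-- negative-index wraparound scan and B's find-clamping are both accidental behaviours nobody would specify.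
def Pre_extract_entry_content_py (content : String) (start : Int) : Prop := 0 ≤ start
instance (content : String) (start : Int) : Decidable (Pre_extract_entry_content_py content start) := by unfold Pre_extract_entry_content_py; infer_instance

def pvWitness_extract_entry_content_py : String × Int := ("author = {Ada}}", 10)

def Spec_extract_entry_content_py (content : String) (start : Int) (out : Option String) : Prop := out = extract_entry_content_py_alt content start
instance (content : String) (start : Int) (out : Option String) : Decidable (Spec_extract_entry_content_py content start out) := by unfold Spec_extract_entry_content_py; infer_instance

-- ===== CLAIM (what is proved, stated in full; the proofs are below) =====
def Claim_equal_extract_entry_content_py : Prop := ∀ (content : String) (start : Int), Dom_extract_entry_content_py content start → Pre_extract_entry_content_py content start → Spec_extract_entry_content_py content start (extract_entry_content_py content start)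

-- ===== LEMMAS AND PROOFS =====

-- Abstract brace scan: pvScan t b = some k iff the depth counter (starting at b) hits 0 after
-- consuming exactly k characters of t; none if it never does.
def pvScan : List Char → Int → Option Nat
  | [], _ => none
  | ch :: r, b =>
    let b' := if ch = '{' then b + 1 else if ch = '}' then b - 1 else b
    if b' = 0 then some 1 else (pvScan r b').map (· + 1)

lemma pvScan_no_close (t : List Char) (b : Int) (h : ∀ ch ∈ t, ch ≠ '}') (hb : 0 < b) :
    pvScan t b = none := by
  induction t generalizing b with
  | nil => rfl
  | cons x r ih =>
    have hx : x ≠ '}' := h x (by simp)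
    have hb' : (0:Int) < if x = '{' then b + 1 else if x = '}' then b - 1 else b := by
      split_ifs <;> omega
    simp only [pvScan]
    rw [if_neg (by omega)]
    rw [ih _ (fun c hc => h c (List.mem_cons_of_mem _ hc)) hb']
    rfl

lemma pvScan_skip (xs rest : List Char) (b : Int) (h : ∀ ch ∈ xs, ch ≠ '{' ∧ ch ≠ '}')
    (hb : b ≠ 0) : pvScan (xs ++ rest) b = (pvScan rest b).map (· + xs.length) := by
  induction xs with
  | nil => cases h' : pvScan rest b <;> simp [h']
  | cons x r ih =>
    have hx := h x (by simp)
    simp only [List.cons_append, pvScan, if_neg hx.1, if_neg hx.2, if_neg hb]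
    rw [ih (fun c hc => h c (by simp [hc]))]
    cases h' : pvScan rest b <;> simp [h'] <;> omega

lemma pvScan_cons_close (r : List Char) (b : Int) :
    pvScan ('}' :: r) b = if b - 1 = 0 then some 1 else (pvScan r (b - 1)).map (· + 1) := by
  simp [pvScan]

lemma pvScan_cons_open (r : List Char) (b : Int) :
    pvScan ('{' :: r) b = if b + 1 = 0 then some 1 else (pvScan r (b + 1)).map (· + 1) := by
  simp [pvScan]

lemma pv_scan_split (t : List Char) (n : Nat) (b : Int) (hn : n ≤ t.length)
    (h : ∀ x ∈ t.take n, x ≠ '{' ∧ x ≠ '}') (hb : b ≠ 0) :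
    pvScan t b = (pvScan (t.drop n) b).map (· + n) := by
  conv_lhs => rw [← List.take_append_drop n t]
  rw [pvScan_skip _ _ b h hb]
  have : (t.take n).length = n := by rw [List.length_take]; omega
  rw [this]

lemma pv_singleton_prefix (ch : Char) (l : List Char) : [ch] <+: l ↔ l.head? = some ch := by
  cases l with
  | nil => simp
  | cons x r =>
    constructor
    · rintro ⟨u, hu⟩; simp at hu; simp [hu.1]
    · intro h; simp at h; exact ⟨r, by simp [h]⟩

lemma pv_take_ne (t : List Char) (ch : Char) (n : Nat)
    (h : ∀ i < n, ¬ [ch] <+: t.drop i) : ∀ x ∈ t.take n, x ≠ ch := by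
  intro x hx
  obtain ⟨i, hi, hget⟩ := List.mem_take_iff_getElem.mp hx
  intro hxc
  apply h i (lt_of_lt_of_le hi (min_le_left _ _))
  rw [pv_singleton_prefix]
  rw [List.drop_eq_getElem_cons (lt_of_lt_of_le hi (min_le_right _ _))]
  simp [hget, hxc]

lemma pv_findFrom_gt (s sub : List Char) (st : Int) (h : (s.length : Int) < st) :
    PySem.Chars.findFrom s sub st none = -1 := by
  simp only [PySem.Chars.findFrom]
  split_ifs <;> first | rfl | omega

-- A's loop computes pvScan: final brace = 0 iff pvScan returns some k, final pos = pos + k then.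
lemma pvALoop_eq (content : String) (fuel : Nat) : ∀ (b : Int) (pos : Nat),
    content.toList.length ≤ pos + fuel → 0 < b →
    (if (pvALoop content fuel b (pos : Int)).1 = 0 then some (pvALoop content fuel b (pos : Int)).2 else none)
      = (pvScan (content.toList.drop pos) b).map (fun k : Nat => (pos : Int) + (k : Int)) := by
  induction fuel with
  | zero =>
    intro b pos hfuel hb
    rw [List.drop_eq_nil_of_le (by omega)]
    simp [pvALoop, pvScan, hb.ne']
  | succ f ih =>
    intro b pos hfuel hb
    by_cases hlt : pos < content.toList.length
    · have hguard : ((pos : Int) < PySem.Str.len content ∧ b > 0) := by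
        rw [PySem.Str.len_eq]; exact ⟨by exact_mod_cast hlt, hb⟩
      have hget : PySem.Str.pyGet? content (pos : Int) = some content.toList[pos] := by
        rw [PySem.Str.pyGet?_eq]
        show PySem.List.pyGet? content.toList (pos : Int) = _
        rw [PySem.List.pyGet?_natCast, List.getElem?_eq_getElem hlt]
      rw [List.drop_eq_getElem_cons hlt]
      simp only [pvALoop, if_pos hguard, hget, pvScan]
      set ch := content.toList[pos] with hch
      set b' : Int := if ch = '{' then b + 1 else if ch = '}' then b - 1 else b with hb'
      by_cases hb0 : b' = 0
      · have hstop : ∀ g p, pvALoop content g 0 p = (0, p) := by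
          intro g p; cases g <;> simp [pvALoop]
        rw [hb0, hstop]
        simp
      · have hbpos : 0 < b' := by rw [hb'] at hb0 ⊢; split_ifs at hb0 ⊢ <;> omega
        rw [if_neg hb0]
        have := ih b' (pos + 1) (by omega) hbpos
        push_cast at this
        rw [this]
        cases h' : pvScan (content.toList.drop (pos + 1)) b' <;> simp [h'] <;> push_cast <;> ring
    · have hng : ¬ ((pos : Int) < PySem.Str.len content ∧ b > 0) := by
        rw [PySem.Str.len_eq]
        intro hc
        exact hlt (by exact_mod_cast hc.1)
      rw [List.drop_eq_nil_of_le (by omega)]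
      simp only [pvALoop, if_neg hng, pvScan]
      simp [hb.ne']

lemma pv_mem_infix (ch : Char) (t : List Char) (h : ch ∈ t) : [ch] <:+: t := by
  obtain ⟨u, v, rfl⟩ := List.append_of_mem h
  exact ⟨u, v, by simp⟩

-- B's loop computes pvScan too, already composed with the final slice.
lemma pvBLoop_eq (content : String) (start : Int) (fuel : Nat) : ∀ (b : Int) (pos : Nat),
    pos ≤ content.toList.length → content.toList.length ≤ pos + fuel → 0 < b →
    pvBLoop content start fuel b (pos : Int)
      = (pvScan (content.toList.drop pos) b).map
          (fun k : Nat => PySem.Str.slice content (some start) (some ((pos : Int) + (k : Int) - 1))) := by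
  induction fuel with
  | zero =>
    intro b pos hpos hfuel hb
    rw [List.drop_eq_nil_of_le (by omega)]
    simp [pvBLoop, pvScan]
  | succ f ih =>
    intro b pos hpos hfuel hb
    have htlen : (content.toList.drop pos).length = content.toList.length - pos :=
      List.length_drop ..
    have hdd : ∀ m : Nat, (content.toList.drop pos).drop m = content.toList.drop (pos + m) := by
      intro m; rw [List.drop_drop, Nat.add_comm]
    have hfindc : PySem.Str.findFrom content "}" (pos : Int) =
        (if PySem.Chars.find (content.toList.drop pos) ['}'] = -1 then -1
         else (pos : Int) + PySem.Chars.find (content.toList.drop pos) ['}']) := by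
      rw [PySem.Str.findFrom_eq, show "}".toList = ['}'] from by decide,
        PySem.Chars.findFrom_natCast _ _ pos hpos]
    have hfindo : PySem.Str.findFrom content "{" (pos : Int) =
        (if PySem.Chars.find (content.toList.drop pos) ['{'] = -1 then -1
         else (pos : Int) + PySem.Chars.find (content.toList.drop pos) ['{']) := by
      rw [PySem.Str.findFrom_eq, show "{".toList = ['{'] from by decide,
        PySem.Chars.findFrom_natCast _ _ pos hpos]
    simp only [pvBLoop, hfindc, hfindo]
    set t := content.toList.drop pos with ht
    by_cases hfc : PySem.Chars.find t ['}'] = -1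
    · rw [if_pos (by rw [if_pos hfc])]
      rw [pvScan_no_close t b ?_ hb]
      · rfl
      · intro ch hch hceq
        exact (PySem.Chars.find_eq_neg_one_iff t ['}']).mp hfc (hceq ▸ pv_mem_infix ch t hch)
    · have hfc0 : 0 ≤ PySem.Chars.find t ['}'] := by
        have := PySem.Chars.neg_one_le_find t ['}']; omega
      obtain ⟨hprefc, hfirstc⟩ := PySem.Chars.find_spec (s := t) (sub := ['}']) hfc0
      set cN := (PySem.Chars.find t ['}']).toNat with hcN
      have hfcN : PySem.Chars.find t ['}'] = (cN : Int) := (Int.toNat_of_nonneg hfc0).symm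
      obtain ⟨u, hu⟩ := hprefc
      have hcNlt : cN < t.length := by
        by_contra hcl
        rw [List.drop_eq_nil_of_le (by omega)] at hu
        simp at hu
      have hdg := List.drop_eq_getElem_cons hcNlt (l := t)
      have hdropc : t.drop cN = '}' :: t.drop (cN + 1) := by
        have h := hu.trans hdg
        rw [List.singleton_append] at h
        injection h with h1 h2
        rw [hdg, ← h1]
      have hnc : ∀ x ∈ t.take cN, x ≠ '}' := pv_take_ne t '}' cN hfirstc
      rw [if_neg hfc, hfcN]
      rw [if_neg (show ¬((pos : Int) + (cN : Int) = -1) by omega)]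
      -- the closing-brace step, used by both "no '{' before the '}'" branches
      have hclosing : (∀ x ∈ t.take cN, x ≠ '{') →
          (if b - 1 = 0 then
            some (PySem.Str.slice content (some start) (some ((pos : Int) + (cN : Int) + 1 - 1)))
           else pvBLoop content start f (b - 1) ((pos : Int) + (cN : Int) + 1))
          = (pvScan t b).map
              (fun k : Nat => PySem.Str.slice content (some start) (some ((pos : Int) + (k : Int) - 1))) := by
        intro hno
        have hnb : ∀ x ∈ t.take cN, x ≠ '{' ∧ x ≠ '}' := fun x hx => ⟨hno x hx, hnc x hx⟩
        have h1 : pvScan t b = (pvScan (t.drop cN) b).map (· + cN) :=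
          pv_scan_split t cN b hcNlt.le hnb hb.ne'
        have h2 : pvScan (t.drop cN) b
            = if b - 1 = 0 then some 1 else (pvScan (t.drop (cN + 1)) (b - 1)).map (· + 1) := by
          rw [hdropc, pvScan_cons_close]
        by_cases hb1 : b - 1 = 0
        · rw [if_pos hb1, h1, h2, if_pos hb1]
          simp only [Option.map_some, Option.some.injEq]
          congr 1
          push_cast
          ring
        · rw [if_neg hb1, h1, h2, if_neg hb1]
          rw [show (pos : Int) + (cN : Int) + 1 = ((pos + cN + 1 : Nat) : Int) by push_cast; ring]
          rw [ih (b - 1) (pos + cN + 1) (by omega) (by omega) (by omega)]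
          rw [show t.drop (cN + 1) = content.toList.drop (pos + cN + 1) by
            rw [hdd (cN + 1)]; congr 1]
          cases h' : pvScan (content.toList.drop (pos + cN + 1)) (b - 1) <;> simp [h']
          congr 3
          omega
      by_cases hfo : PySem.Chars.find t ['{'] = -1
      · -- no '{' anywhere after pos: the '}' branch of B is taken
        rw [if_pos hfo]
        rw [if_neg (show ¬((-1 : Int) ≠ -1 ∧ (-1 : Int) < (pos : Int) + (cN : Int)) by simp)]
        exact hclosing (by
          intro x hx hxeq
          exact (PySem.Chars.find_eq_neg_one_iff t ['{']).mp hfo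
            (hxeq ▸ pv_mem_infix x t (List.mem_of_mem_take hx)))
      · have hfo0 : 0 ≤ PySem.Chars.find t ['{'] := by
          have := PySem.Chars.neg_one_le_find t ['{']; omega
        obtain ⟨hprefo, hfirsto⟩ := PySem.Chars.find_spec (s := t) (sub := ['{']) hfo0
        set oN := (PySem.Chars.find t ['{']).toNat with hoN
        have hfoN : PySem.Chars.find t ['{'] = (oN : Int) := (Int.toNat_of_nonneg hfo0).symm
        rw [if_neg hfo, hfoN]
        by_cases hoc : oN < cN
        · -- the next brace is a '{'
          rw [if_pos ⟨by omega, by omega⟩]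
          obtain ⟨v, hv⟩ := hprefo
          have hoNlt : oN < t.length := by omega
          have hdgo := List.drop_eq_getElem_cons hoNlt (l := t)
          have hdropo : t.drop oN = '{' :: t.drop (oN + 1) := by
            have h := hv.trans hdgo
            rw [List.singleton_append] at h
            injection h with h1 h2
            rw [hdgo, ← h1]
          have hnbo : ∀ x ∈ t.take oN, x ≠ '{' ∧ x ≠ '}' := by
            intro x hx
            obtain ⟨i, hi, hget⟩ := List.mem_take_iff_getElem.mp hx
            exact ⟨pv_take_ne t '{' oN hfirsto x hx,
              hnc x (List.mem_take_iff_getElem.mpr ⟨i, by omega, hget⟩)⟩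
          have h1 : pvScan t b = (pvScan (t.drop oN) b).map (· + oN) :=
            pv_scan_split t oN b hoNlt.le hnbo hb.ne'
          have h2 : pvScan (t.drop oN) b = (pvScan (t.drop (oN + 1)) (b + 1)).map (· + 1) := by
            rw [hdropo, pvScan_cons_open, if_neg (by omega)]
          rw [show (pos : Int) + (oN : Int) + 1 = ((pos + oN + 1 : Nat) : Int) by push_cast; ring]
          rw [ih (b + 1) (pos + oN + 1) (by omega) (by omega) (by omega)]
          rw [h1, h2]
          rw [show t.drop (oN + 1) = content.toList.drop (pos + oN + 1) by
            rw [hdd (oN + 1)]; congr 1]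
          cases h' : pvScan (content.toList.drop (pos + oN + 1)) (b + 1) <;> simp [h']
          congr 3
          omega
        · -- the next brace is the '}' (the '{' comes at or after it)
          rw [if_neg (by
            intro hcond
            have h5 := hcond.2
            have h6 : (oN : Int) < (cN : Int) := by omega
            exact hoc (by exact_mod_cast h6))]
          exact hclosing (pv_take_ne t '{' cN (fun i hi => hfirsto i (by omega)))

-- ===== VERDICT (by name: the statement is the Claim_ definition above) =====
theorem extract_entry_content_py_spec : Claim_equal_extract_entry_content_py := by
  intro content start _ hpre
  obtain ⟨pos, rfl⟩ : ∃ p : Nat, start = (p : Int) :=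
    ⟨start.toNat, (Int.toNat_of_nonneg hpre).symm⟩
  unfold Spec_extract_entry_content_py extract_entry_content_py extract_entry_content_py_alt
  have hA := pvALoop_eq content content.toList.length 1 pos (by omega) one_pos
  by_cases hle : pos ≤ content.toList.length
  · rw [pvBLoop_eq content (pos : Int) (content.toList.length + 1) 1 pos hle (by omega) one_pos]
    rcases hsc : pvScan (content.toList.drop pos) 1 with _ | k <;> rw [hsc] at hA <;>
      simp only [Option.map_none, Option.map_some] at hA ⊢
    · by_cases hz : (pvALoop content content.toList.length 1 (pos : Int)).1 = 0
      · rw [if_pos hz] at hA; cases hA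
      · simp only [String.length_toList] at hz ⊢
        simp [hz]
    · by_cases hz : (pvALoop content content.toList.length 1 (pos : Int)).1 = 0
      · rw [if_pos hz] at hA
        simp only [Option.some.injEq] at hA
        simp only [String.length_toList] at hz hA ⊢
        simp [hz, hA]
      · rw [if_neg hz] at hA; cases hA
  · -- start beyond the end of the string: both programs return None
    have hsc : pvScan (content.toList.drop pos) 1 = none := by
      rw [List.drop_eq_nil_of_le (by omega)]; rfl
    rw [hsc] at hA
    simp only [Option.map_none] at hA
    have hBnone : pvBLoop content (pos : Int) (content.toList.length + 1) 1 (pos : Int) = none := by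
      simp only [pvBLoop]
      rw [PySem.Str.findFrom_eq, pv_findFrom_gt _ _ _ (by exact_mod_cast (show content.toList.length < pos by omega))]
      simp
    rw [hBnone]
    by_cases hz : (pvALoop content content.toList.length 1 (pos : Int)).1 = 0
    · rw [if_pos hz] at hA; cases hA
    · simp only [String.length_toList] at hz ⊢
      simp [hz]
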